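-- pv_equiv track=rewrite | github.com/Jinyang7766/Career-Hero-openclaw | backend/tests/test_prd_followup_gate.py | _find_interview_lifecycle_paths
-- ===== SOURCE A (Python) =====
-- from typing import Any
--
-- def _find_interview_lifecycle_paths(
--     spec: dict[str, Any],
-- ) -> tuple[str | None, str | None, tuple[str, str] | None, tuple[str, str] | None, tuple[str, str] | None]:
--     paths = spec.get("paths", {})
--
--     create_path: str | None = None
--     list_path: str | None = None
--     detail: tuple[str, str] | None = None
--     pause: tuple[str, str] | None = None
--     resume: tuple[str, str] | None = None
--
--     for path, methods in paths.items():
--         lowered = path.lower()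
--         if "interview" not in lowered:
--             continue
--
--         if "post" in methods and "create" in lowered and create_path is None:
--             create_path = path
--
--         if "get" in methods and "{" not in path and any(tag in lowered for tag in ("sessions", "list")) and list_path is None:
--             list_path = path
--
--         if "{" in path:
--             for method in ("get", "post", "patch", "put"):
--                 if method not in methods:
--                     continue
--                 if detail is None and method == "get" and any(tag in lowered for tag in ("detail", "session")):
--                     detail = (path, method)
--                 if pause is None and "pause" in lowered:
--                     pause = (path, method)
--                 if resume is None and "resume" in lowered:
--                     resume = (path, method)
--
--     return create_path, list_path, detail, pause, resume
-- ===== SOURCE B (Python) =====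
-- def _find_interview_lifecycle_paths(spec):
--     paths = spec.get("paths", {})
--
--     def first_method(methods):
--         return next((m for m in ("get", "post", "patch", "put") if m in methods), None)
--
--     create_path = next(
--         (p for p, ms in paths.items()
--          if "interview" in p.lower() and "post" in ms and "create" in p.lower()),
--         None)
--     list_path = next(
--         (p for p, ms in paths.items()
--          if "interview" in p.lower() and "get" in ms and "{" not in p
--          and ("sessions" in p.lower() or "list" in p.lower())),
--         None)
--     detail = next(
--         ((p, "get") for p, ms in paths.items()
--          if "interview" in p.lower() and "{" in p and "get" in ms
--          and ("detail" in p.lower() or "session" in p.lower())),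
--         None)
--     pause = next(
--         ((p, first_method(ms)) for p, ms in paths.items()
--          if "interview" in p.lower() and "{" in p and "pause" in p.lower()
--          and first_method(ms) is not None),
--         None)
--     resume = next(
--         ((p, first_method(ms)) for p, ms in paths.items()
--          if "interview" in p.lower() and "{" in p and "resume" in p.lower()
--          and first_method(ms) is not None),
--         None)
--     return create_path, list_path, detail, pause, resume
-- ===== Notes on version B (the rewrite author's own statement) =====
-- stated objective: simpler
-- what changed: A's single loop threading a five-slot accumulator (with a nested method loop and 'is None' guards) is replaced by five independent first-match scans of paths.items(), one per returned slot, with the (path, method) slots taking the first of ('get','post','patch','put') present in that path's methods.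
import Mathlib
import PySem

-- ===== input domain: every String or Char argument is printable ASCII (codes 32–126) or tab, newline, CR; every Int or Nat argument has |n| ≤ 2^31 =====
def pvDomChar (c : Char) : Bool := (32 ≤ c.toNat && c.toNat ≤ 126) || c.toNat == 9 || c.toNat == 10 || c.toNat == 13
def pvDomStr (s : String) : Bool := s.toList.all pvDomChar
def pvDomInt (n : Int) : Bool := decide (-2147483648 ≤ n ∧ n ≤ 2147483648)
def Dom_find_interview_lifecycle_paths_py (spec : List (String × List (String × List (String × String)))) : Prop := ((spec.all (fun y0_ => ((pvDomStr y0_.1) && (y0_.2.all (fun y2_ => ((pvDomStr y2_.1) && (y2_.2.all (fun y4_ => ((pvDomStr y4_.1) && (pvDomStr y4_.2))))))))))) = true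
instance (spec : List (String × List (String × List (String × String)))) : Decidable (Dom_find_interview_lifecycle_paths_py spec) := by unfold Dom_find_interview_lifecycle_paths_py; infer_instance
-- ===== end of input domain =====

-- B replaces A's single accumulating loop (five once-set slots with an inner method loop) by five
-- independent first-match scans of paths.items(); objective: simpler — no speed claim.

-- shared helper: Python's  m in methods  (dict key membership)
def pvHasKey (ms : List (String × String)) (m : String) : Bool :=
  ms.any (fun kv => kv.1 == m)

-- ===== PORT A =====
-- A's inner  for method in ("get", "post", "patch", "put")  loop over the slots (detail, pause, resume)
def pvAInner (pa lowered : String) (ms : List (String × String))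
    (st : Option (String × String) × Option (String × String) × Option (String × String)) :
    Option (String × String) × Option (String × String) × Option (String × String) :=
  (["get", "post", "patch", "put"] : List String).foldl (fun st m =>
    if !(pvHasKey ms m) then st
    else
      (if st.1.isNone && (m == "get")
          && (PySem.Str.isIn "detail" lowered || PySem.Str.isIn "session" lowered)
       then some (pa, m) else st.1,
       if st.2.1.isNone && PySem.Str.isIn "pause" lowered then some (pa, m) else st.2.1,
       if st.2.2.isNone && PySem.Str.isIn "resume" lowered then some (pa, m) else st.2.2)) st

-- body of A's  for path, methods in paths.items()  loop (state = (create, list, detail, pause, resume))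
def pvAStep
    (st : Option String × Option String × Option (String × String) × Option (String × String) × Option (String × String))
    (e : String × List (String × String)) :
    Option String × Option String × Option (String × String) × Option (String × String) × Option (String × String) :=
  if !(PySem.Str.isIn "interview" (PySem.Str.lower e.1)) then st
  else
    (if pvHasKey e.2 "post" && PySem.Str.isIn "create" (PySem.Str.lower e.1) && st.1.isNone
     then some e.1 else st.1,
     if pvHasKey e.2 "get" && !(PySem.Str.isIn "{" e.1)
        && (PySem.Str.isIn "sessions" (PySem.Str.lower e.1) || PySem.Str.isIn "list" (PySem.Str.lower e.1))
        && st.2.1.isNone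
     then some e.1 else st.2.1,
     if PySem.Str.isIn "{" e.1 then pvAInner e.1 (PySem.Str.lower e.1) e.2 st.2.2 else st.2.2)

def find_interview_lifecycle_paths_py (spec : List (String × List (String × List (String × String)))) : Option String × Option String × (Option (String × String)) × (Option (String × String)) × (Option (String × String)) :=
  ((PySem.Dict.mk spec).getD "paths" []).foldl pvAStep (none, none, none, none, none)

-- ===== PORT B =====
-- B's first_method(methods): the first of ("get", "post", "patch", "put") present in methods
def pvFirstMethod (ms : List (String × String)) : Option String :=
  (["get", "post", "patch", "put"] : List String).find? (fun m => pvHasKey ms m)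

-- the five generator-expression filters of B, as named predicates
def pvPredCreate (e : String × List (String × String)) : Bool :=
  PySem.Str.isIn "interview" (PySem.Str.lower e.1) && pvHasKey e.2 "post"
    && PySem.Str.isIn "create" (PySem.Str.lower e.1)

def pvPredList (e : String × List (String × String)) : Bool :=
  PySem.Str.isIn "interview" (PySem.Str.lower e.1) && pvHasKey e.2 "get"
    && !(PySem.Str.isIn "{" e.1)
    && (PySem.Str.isIn "sessions" (PySem.Str.lower e.1) || PySem.Str.isIn "list" (PySem.Str.lower e.1))

def pvPredDetail (e : String × List (String × String)) : Bool :=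
  PySem.Str.isIn "interview" (PySem.Str.lower e.1) && PySem.Str.isIn "{" e.1
    && pvHasKey e.2 "get"
    && (PySem.Str.isIn "detail" (PySem.Str.lower e.1) || PySem.Str.isIn "session" (PySem.Str.lower e.1))

def pvPredPause (e : String × List (String × String)) : Bool :=
  PySem.Str.isIn "interview" (PySem.Str.lower e.1) && PySem.Str.isIn "{" e.1
    && PySem.Str.isIn "pause" (PySem.Str.lower e.1) && (pvFirstMethod e.2).isSome

def pvPredResume (e : String × List (String × String)) : Bool :=
  PySem.Str.isIn "interview" (PySem.Str.lower e.1) && PySem.Str.isIn "{" e.1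
    && PySem.Str.isIn "resume" (PySem.Str.lower e.1) && (pvFirstMethod e.2).isSome

def find_interview_lifecycle_paths_py_alt (spec : List (String × List (String × List (String × String)))) : Option String × Option String × (Option (String × String)) × (Option (String × String)) × (Option (String × String)) :=
  let paths := (PySem.Dict.mk spec).getD "paths" []
  ((paths.find? pvPredCreate).map (fun e => e.1),
   (paths.find? pvPredList).map (fun e => e.1),
   (paths.find? pvPredDetail).map (fun e => (e.1, "get")),
   (paths.find? pvPredPause).map (fun e => (e.1, (pvFirstMethod e.2).getD "")),
   (paths.find? pvPredResume).map (fun e => (e.1, (pvFirstMethod e.2).getD "")))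

-- ===== PRECONDITION & SPEC =====
def Spec_find_interview_lifecycle_paths_py (spec : List (String × List (String × List (String × String)))) (out : Option String × Option String × (Option (String × String)) × (Option (String × String)) × (Option (String × String))) : Prop := out = find_interview_lifecycle_paths_py_alt spec
instance (spec : List (String × List (String × List (String × String)))) (out : Option String × Option String × (Option (String × String)) × (Option (String × String)) × (Option (String × String))) : Decidable (Spec_find_interview_lifecycle_paths_py spec out) := by unfold Spec_find_interview_lifecycle_paths_py; infer_instance

-- ===== CLAIM (what is proved, stated in full; the proofs are below) =====
def Claim_equal_find_interview_lifecycle_paths_py : Prop := ∀ (spec : List (String × List (String × List (String × String)))), Dom_find_interview_lifecycle_paths_py spec → Spec_find_interview_lifecycle_paths_py spec (find_interview_lifecycle_paths_py spec)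

-- ===== LEMMAS AND PROOFS =====

-- A's inner method loop, with the three substring tests abstracted to Booleans
lemma pvAInnerGen (pa : String) (ms : List (String × String)) (bDS bPa bRe : Bool) :
    ∀ (L : List String) (d p r : Option (String × String)),
    L.foldl (fun st m =>
      if !(pvHasKey ms m) then st
      else
        (if st.1.isNone && (m == "get") && bDS then some (pa, m) else st.1,
         if st.2.1.isNone && bPa then some (pa, m) else st.2.1,
         if st.2.2.isNone && bRe then some (pa, m) else st.2.2)) (d, p, r) =
      (d.or (if (L.any fun m => pvHasKey ms m && m == "get") && bDS
             then some (pa, "get") else none),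
       p.or (if bPa then (L.find? fun m => pvHasKey ms m).map (fun m => (pa, m)) else none),
       r.or (if bRe then (L.find? fun m => pvHasKey ms m).map (fun m => (pa, m)) else none)) := by
  intro L
  induction L with
  | nil => intro d p r; simp
  | cons m L IH =>
    intro d p r
    rw [List.foldl_cons]
    rcases Bool.eq_false_or_eq_true (pvHasKey ms m) with hk | hk
    · rw [IH]; clear IH
      rcases Bool.eq_false_or_eq_true (m == "get") with hmg | hmg
      · have hm : m = "get" := eq_of_beq hmg
        subst hm
        cases bDS <;> cases bPa <;> cases bRe <;> cases d <;> cases p <;> cases r <;>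
          simp [hk, Option.or, List.any_cons]
      · have hm : m ≠ "get" := ne_of_beq_false hmg
        cases bDS <;> cases bPa <;> cases bRe <;> cases d <;> cases p <;> cases r <;>
          simp [hk, hm, Option.or, List.any_cons]
    · rw [IH]; clear IH
      simp [hk, List.any_cons]

-- A's inner loop on the four literal methods, per-slot first-match form
lemma pvAInner_eq (pa lowered : String) (ms : List (String × String))
    (d p r : Option (String × String)) :
    pvAInner pa lowered ms (d, p, r) =
      (d.or (if pvHasKey ms "get"
                && (PySem.Str.isIn "detail" lowered || PySem.Str.isIn "session" lowered)
             then some (pa, "get") else none),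
       p.or (if PySem.Str.isIn "pause" lowered
             then (pvFirstMethod ms).map (fun m => (pa, m)) else none),
       r.or (if PySem.Str.isIn "resume" lowered
             then (pvFirstMethod ms).map (fun m => (pa, m)) else none)) := by
  unfold pvAInner
  rw [pvAInnerGen]
  have hany : ((["get", "post", "patch", "put"] : List String).any
      fun m => pvHasKey ms m && m == "get") = pvHasKey ms "get" := by
    simp [List.any_cons]
  rw [hany]
  rfl

-- one step of A's outer loop, per-slot first-match form
lemma pvStep_eq (pa : String) (ms : List (String × String))
    (c l : Option String) (d p r : Option (String × String)) :
    pvAStep (c, l, d, p, r) (pa, ms) =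
      (c.or (if pvPredCreate (pa, ms) then some pa else none),
       l.or (if pvPredList (pa, ms) then some pa else none),
       d.or (if pvPredDetail (pa, ms) then some (pa, "get") else none),
       p.or (if pvPredPause (pa, ms) then some (pa, (pvFirstMethod ms).getD "") else none),
       r.or (if pvPredResume (pa, ms) then some (pa, (pvFirstMethod ms).getD "") else none)) := by
  unfold pvAStep pvPredCreate pvPredList pvPredDetail pvPredPause pvPredResume
  dsimp only
  rw [pvAInner_eq]
  generalize PySem.Str.isIn "interview" (PySem.Str.lower pa) = bI
  generalize PySem.Str.isIn "{" pa = bB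
  generalize pvHasKey ms "post" = bPost
  generalize pvHasKey ms "get" = bGet
  generalize PySem.Str.isIn "create" (PySem.Str.lower pa) = bCr
  generalize PySem.Str.isIn "sessions" (PySem.Str.lower pa) = bSe
  generalize PySem.Str.isIn "list" (PySem.Str.lower pa) = bLi
  generalize PySem.Str.isIn "detail" (PySem.Str.lower pa) = bDe
  generalize PySem.Str.isIn "session" (PySem.Str.lower pa) = bSs
  generalize PySem.Str.isIn "pause" (PySem.Str.lower pa) = bPa
  generalize PySem.Str.isIn "resume" (PySem.Str.lower pa) = bRe
  generalize hFM : pvFirstMethod ms = fm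
  cases bI
  · simp
  · simp only [Bool.not_true, Bool.false_eq_true, if_false, Bool.true_and, Prod.mk.injEq]
    refine ⟨?_, ?_, ?_⟩
    · cases c <;> cases bPost <;> cases bCr <;> simp [Option.or]
    · cases l <;> cases bGet <;> cases bB <;> cases bSe <;> cases bLi <;> simp [Option.or]
    · cases bB
      · rw [if_neg (by simp)]
        simp
      · rw [if_pos rfl]
        simp only [Bool.true_and, Prod.mk.injEq]
        refine ⟨?_, ?_, ?_⟩
        · cases d <;> cases bGet <;> cases bDe <;> cases bSs <;> simp
        · cases p <;> cases bPa <;> cases fm <;> simp [Option.or]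
        · cases r <;> cases bRe <;> cases fm <;> simp

-- folding one more entry into an .or-of-first-match accumulator
lemma pvOrStep {α β : Type} (x : Option β) (q : α → Bool) (f : α → β) (e : α) (rest : List α) :
    (x.or (if q e then some (f e) else none)).or ((rest.find? q).map f) =
      x.or (((e :: rest).find? q).map f) := by
  cases x <;> rcases Bool.eq_false_or_eq_true (q e) with hq | hq <;>
    simp [hq, Option.or]

-- A's whole loop: each slot is its start value if already set, else B's scan for that slot
lemma pvLoop_eq (paths : List (String × List (String × String)))
    (c l : Option String) (d p r : Option (String × String)) :
    paths.foldl pvAStep (c, l, d, p, r) =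
      (c.or ((paths.find? pvPredCreate).map (fun e => e.1)),
       l.or ((paths.find? pvPredList).map (fun e => e.1)),
       d.or ((paths.find? pvPredDetail).map (fun e => (e.1, "get"))),
       p.or ((paths.find? pvPredPause).map (fun e => (e.1, (pvFirstMethod e.2).getD ""))),
       r.or ((paths.find? pvPredResume).map (fun e => (e.1, (pvFirstMethod e.2).getD "")))) := by
  induction paths generalizing c l d p r with
  | nil => simp
  | cons e rest IH =>
    obtain ⟨pa, ms⟩ := e
    rw [List.foldl_cons, pvStep_eq, IH]
    simp only [Prod.mk.injEq]
    exact ⟨pvOrStep c pvPredCreate (fun e => e.1) (pa, ms) rest,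
           pvOrStep l pvPredList (fun e => e.1) (pa, ms) rest,
           pvOrStep d pvPredDetail (fun e => (e.1, "get")) (pa, ms) rest,
           pvOrStep p pvPredPause (fun e => (e.1, (pvFirstMethod e.2).getD "")) (pa, ms) rest,
           pvOrStep r pvPredResume (fun e => (e.1, (pvFirstMethod e.2).getD "")) (pa, ms) rest⟩

-- ===== VERDICT (by name: the statement is the Claim_ definition above) =====
theorem find_interview_lifecycle_paths_py_spec : Claim_equal_find_interview_lifecycle_paths_py := by
  intro spec _
  show _ = _
  unfold find_interview_lifecycle_paths_py find_interview_lifecycle_paths_py_alt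
  rw [pvLoop_eq]
  simp [Option.or]
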